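-- pv_equiv track=rewrite | github.com/DaJu-Duck/excel_splitter | excel_splitter_v1.1.0.py | build_row_mapping_after_deletion
-- ===== SOURCE A (Python) =====
-- def build_row_mapping_after_deletion(original_map, deleted_rows):
--     """在删除行后，建立原始行号到新行号的映射关系"""
--     mapping = {}
--     offset = 0
--
--     for orig_row in sorted(original_map.keys()):
--         if orig_row in deleted_rows:
--             # 该行被删除，映射到None
--             mapping[orig_row] = None
--             offset += 1
--         else:
--             # 该行保留，新行号 = 原行号 - 偏移量
--             mapping[orig_row] = orig_row - offset
--
--     return mapping
-- ===== SOURCE B (Python) =====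
-- def build_row_mapping_after_deletion(original_map, deleted_rows):
--     """Per-key direct formula: new row = orig - (number of deleted keys below it),
--     found by binary search over a prebuilt sorted index of deleted keys."""
--     deleted = set(deleted_rows)
--     deleted_keys = sorted(k for k in original_map if k in deleted)
--
--     def bisect_left(a, x):
--         lo, hi = 0, len(a)
--         while lo < hi:
--             mid = (lo + hi) // 2
--             if a[mid] < x:
--                 lo = mid + 1
--             else:
--                 hi = mid
--         return lo
--
--     return {k: (None if k in deleted else k - bisect_left(deleted_keys, k))
--             for k in sorted(original_map)}
-- ===== Notes on version B (the rewrite author's own statement) =====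
-- stated objective: alternative
-- what changed: Replaces A's single sorted pass carrying a running deletion-offset accumulator by a per-key direct formula: build a sorted index of the deleted keys once and compute each surviving row's new number as orig - bisect_left(index, orig) via binary search, with no cross-iteration state.
import Mathlib
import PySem

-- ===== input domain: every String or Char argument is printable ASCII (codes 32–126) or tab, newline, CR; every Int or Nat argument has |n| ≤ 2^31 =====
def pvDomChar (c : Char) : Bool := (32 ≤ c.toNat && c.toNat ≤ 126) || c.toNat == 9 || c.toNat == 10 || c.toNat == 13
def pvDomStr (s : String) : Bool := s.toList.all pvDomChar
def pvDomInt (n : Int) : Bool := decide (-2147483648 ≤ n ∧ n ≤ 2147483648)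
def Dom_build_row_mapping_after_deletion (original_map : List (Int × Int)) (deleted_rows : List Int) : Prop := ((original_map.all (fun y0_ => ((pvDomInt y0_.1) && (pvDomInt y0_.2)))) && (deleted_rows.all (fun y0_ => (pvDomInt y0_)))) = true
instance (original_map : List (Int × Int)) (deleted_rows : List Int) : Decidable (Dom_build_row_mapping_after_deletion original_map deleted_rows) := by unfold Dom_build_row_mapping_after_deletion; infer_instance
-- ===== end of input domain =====

-- B replaces A's running deletion-offset accumulator by a per-key binary search over a
-- prebuilt sorted index of deleted keys (objective: alternative decomposition, same result).

-- ===== PORT A =====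
-- for orig_row in sorted(original_map.keys()): running (mapping, offset) state
def build_row_mapping_after_deletion (original_map : List (Int × Int)) (deleted_rows : List Int) : List (Int × Option Int) :=
  let st := (PySem.List.sorted (PySem.Dict.ofList original_map).keys (fun x => x)).foldl
    (fun (s : PySem.Dict Int (Option Int) × Int) orig_row =>
      if deleted_rows.contains orig_row then
        (s.1.insert orig_row none, s.2 + 1)
      else
        (s.1.insert orig_row (some (orig_row - s.2)), s.2))
    (PySem.Dict.empty, 0)
  st.1.items

-- ===== PORT B =====
-- Source B's hand-written bisect_left: while lo < hi: mid = (lo+hi)//2; …  (a[mid] with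
-- 0 ≤ mid < len(a) is List.getD mid 0, exact for an in-range nonnegative index)
def pvBisectLoop (a : List Int) (x : Int) (lo hi : Nat) : Nat :=
  if _h : lo < hi then
    let mid := (lo + hi) / 2
    if a.getD mid 0 < x then pvBisectLoop a x (mid + 1) hi
    else pvBisectLoop a x lo mid
  else lo
termination_by hi - lo
decreasing_by all_goals omega

def build_row_mapping_after_deletion_alt (original_map : List (Int × Int)) (deleted_rows : List Int) : List (Int × Option Int) :=
  let keys := (PySem.Dict.ofList original_map).keys
  let deleted_keys := PySem.List.sorted (keys.filter (fun k => deleted_rows.contains k)) (fun x => x)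
  -- the dict comprehension over sorted (hence distinct) keys
  (PySem.Dict.ofList
    ((PySem.List.sorted keys (fun x => x)).map (fun k =>
      (k, if deleted_rows.contains k then (none : Option Int)
          else some (k - (pvBisectLoop deleted_keys k 0 deleted_keys.length : Int)))))).items

-- ===== PRECONDITION & SPEC =====
def Spec_build_row_mapping_after_deletion (original_map : List (Int × Int)) (deleted_rows : List Int) (out : List (Int × Option Int)) : Prop := out = build_row_mapping_after_deletion_alt original_map deleted_rows
instance (original_map : List (Int × Int)) (deleted_rows : List Int) (out : List (Int × Option Int)) : Decidable (Spec_build_row_mapping_after_deletion original_map deleted_rows out) := by unfold Spec_build_row_mapping_after_deletion; infer_instance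

-- ===== CLAIM (what is proved, stated in full; the proofs are below) =====
def Claim_equal_build_row_mapping_after_deletion : Prop := ∀ (original_map : List (Int × Int)) (deleted_rows : List Int), Dom_build_row_mapping_after_deletion original_map deleted_rows → Spec_build_row_mapping_after_deletion original_map deleted_rows (build_row_mapping_after_deletion original_map deleted_rows)

-- ===== LEMMAS AND PROOFS =====

theorem pvCountBase (a : List Int) (x : Int) (lo : Nat) (hhi : lo ≤ a.length)
    (hlo : ∀ j (hj : j < a.length), j < lo → a[j] < x)
    (hhiP : ∀ j (hj : j < a.length), lo ≤ j → ¬ a[j] < x) :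
    lo = a.countP (fun d => decide (d < x)) := by

  have htd : a = a.take lo ++ a.drop lo := (List.take_append_drop lo a).symm
  rw [htd, List.countP_append]
  have h1 : (a.take lo).countP (fun d => decide (d < x)) = (a.take lo).length := by
    rw [List.countP_eq_length]
    intro d hd
    obtain ⟨i, hi, hrf⟩ := List.getElem_of_mem hd
    have hitk : (a.take lo).length = min lo a.length := by simp
    have hil : i < a.length := by omega
    rw [List.getElem_take] at hrf
    simp only [decide_eq_true_eq]
    rw [← hrf]
    exact hlo i hil (by omega)
  have h2 : (a.drop lo).countP (fun d => decide (d < x)) = 0 := by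
    rw [List.countP_eq_zero]
    intro d hd
    obtain ⟨i, hi, hrf⟩ := List.getElem_of_mem hd
    have hidr : (a.drop lo).length = a.length - lo := by simp
    rw [List.getElem_drop] at hrf
    simp only [decide_eq_true_eq]
    rw [← hrf]
    have hll : lo + i < a.length := by omega
    exact hhiP (lo + i) hll (by omega)
  rw [h1, h2, List.length_take]
  omega

-- binary search over a ≤-sorted list returns the number of elements < x
theorem pvBisectLoop_eq_countP (a : List Int) (x : Int) (hs : a.Pairwise (· ≤ ·)) :
    ∀ lo hi, lo ≤ hi → hi ≤ a.length →
      (∀ j (hj : j < a.length), j < lo → a[j] < x) →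
      (∀ j (hj : j < a.length), hi ≤ j → ¬ a[j] < x) →
      pvBisectLoop a x lo hi = a.countP (fun d => decide (d < x)) := by
  have hmono : ∀ i j (hi : i < a.length) (hj : j < a.length), i ≤ j → a[i] ≤ a[j] := by
    intro i j hi hj hij
    rcases Nat.lt_or_ge i j with h | h
    · exact List.pairwise_iff_getElem.mp hs i j hi hj h
    · have : i = j := by omega
      subst this; exact le_refl _
  suffices H : ∀ n lo hi, hi - lo ≤ n → lo ≤ hi → hi ≤ a.length →
      (∀ j (hj : j < a.length), j < lo → a[j] < x) →
      (∀ j (hj : j < a.length), hi ≤ j → ¬ a[j] < x) →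
      pvBisectLoop a x lo hi = a.countP (fun d => decide (d < x)) by
    intro lo hi hle hhi hlo hhiP
    exact H (hi - lo) lo hi (le_refl _) hle hhi hlo hhiP
  intro n
  induction n with
  | zero =>
    intro lo hi hn hle hhi hlo hhiP
    have hlohi : lo = hi := by omega
    subst hlohi
    rw [pvBisectLoop]
    rw [dif_neg (by omega)]
    exact pvCountBase a x lo hhi hlo hhiP
  | succ n ih =>
    intro lo hi hn hle hhi hlo hhiP
    rw [pvBisectLoop]
    split
    · rename_i hlt
      have hmid1 : lo ≤ (lo + hi) / 2 := by omega
      have hmid2 : (lo + hi) / 2 < hi := by omega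
      have hmidlen : (lo + hi) / 2 < a.length := by omega
      have hgetD : a.getD ((lo + hi) / 2) 0 = a[(lo + hi) / 2] := List.getD_eq_getElem a 0 hmidlen
      show (if a.getD ((lo + hi) / 2) 0 < x then pvBisectLoop a x ((lo + hi) / 2 + 1) hi
            else pvBisectLoop a x lo ((lo + hi) / 2)) = List.countP (fun d => decide (d < x)) a
      split
      · rename_i hcmp
        rw [hgetD] at hcmp
        refine ih _ _ (by omega) (by omega) hhi ?_ hhiP
        intro j hj hjlt
        exact lt_of_le_of_lt (hmono j ((lo + hi) / 2) hj hmidlen (by omega)) hcmp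
      · rename_i hcmp
        rw [hgetD] at hcmp
        refine ih _ _ (by omega) (by omega) (by omega) hlo ?_
        intro j hj hjge hc
        exact hcmp (lt_of_le_of_lt (hmono ((lo + hi) / 2) j hmidlen hj hjge) hc)
    · rename_i hnlt
      have hlohi : lo = hi := by omega
      subst hlohi
      exact pvCountBase a x lo hhi hlo hhiP

-- the entries A's loop appends, with the running offset made explicit
def pvEntries (dr : List Int) : List Int → Int → List (Int × Option Int)
  | [], _ => []
  | k :: t, off =>
      (k, if dr.contains k then none else some (k - off)) ::
        pvEntries dr t (off + if dr.contains k then 1 else 0)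

theorem pvFoldA_items (dr : List Int) :
    ∀ (ks : List Int) (d : PySem.Dict Int (Option Int)) (off : Int),
      ks.Nodup → (∀ k ∈ ks, d.contains k = false) →
      ((ks.foldl
        (fun (s : PySem.Dict Int (Option Int) × Int) orig_row =>
          if dr.contains orig_row then (s.1.insert orig_row none, s.2 + 1)
          else (s.1.insert orig_row (some (orig_row - s.2)), s.2))
        (d, off)).1.items) = d.items ++ pvEntries dr ks off := by
  intro ks
  induction ks with
  | nil => intro d off _ _; simp [pvEntries]
  | cons k t ih =>
    intro d off hnd hfresh
    have hk : d.contains k = false := hfresh k (List.mem_cons_self ..)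
    have hfresh' : ∀ v, ∀ k' ∈ t, (d.insert k v).contains k' = false := by
      intro v k' hk'
      rw [PySem.Dict.contains_insert]
      have : k' ≠ k := by
        rintro rfl; exact (List.nodup_cons.mp hnd).1 hk'
      simp [this, hfresh k' (List.mem_cons_of_mem _ hk')]
    simp only [List.foldl_cons, pvEntries]
    split
    · rename_i hdel
      rw [ih _ _ (List.nodup_cons.mp hnd).2 (hfresh' _),
          PySem.Dict.items_insert_of_not_contains _ _ hk]
      simp
    · rename_i hdel
      rw [ih _ _ (List.nodup_cons.mp hnd).2 (hfresh' _),
          PySem.Dict.items_insert_of_not_contains _ _ hk]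
      simp

-- the accumulator eliminated: on a strictly increasing list the offset at k is the
-- number of deleted keys below k
theorem pvEntries_eq_map (dr : List Int) :
    ∀ (ks : List Int) (dk : List Int) (off : Int),
      ks.Pairwise (· < ·) →
      (∀ k ∈ ks, (dk.countP (fun d => decide (d < k)) : Int)
          = off + ((ks.filter (fun d => dr.contains d)).countP (fun d => decide (d < k)) : Int)) →
      pvEntries dr ks off = ks.map (fun k =>
        (k, if dr.contains k then none
            else some (k - (dk.countP (fun d => decide (d < k)) : Int)))) := by
  intro ks
  induction ks with
  | nil => intro dk off _ _; simp [pvEntries]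
  | cons k t ih =>
    intro dk off hpw hinv
    have hklt : ∀ y ∈ t, k < y := fun y hy => List.rel_of_pairwise_cons hpw hy
    -- at the head no element of (k::t) is < k
    have hhead0 : ((k :: t).filter (fun d => dr.contains d)).countP (fun d => decide (d < k)) = 0 := by
      rw [List.countP_eq_zero]
      intro d hd
      have hdmem : d ∈ k :: t := List.mem_of_mem_filter hd
      rcases List.mem_cons.mp hdmem with rfl | hdt
      · simp
      · simp only [decide_eq_true_eq]
        exact not_lt_of_gt (hklt d hdt)
    have hoff : (dk.countP (fun d => decide (d < k)) : Int) = off := by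
      have := hinv k (List.mem_cons_self ..)
      rw [hhead0] at this; simpa using this
    simp only [pvEntries, List.map_cons]
    rw [hoff]
    congr 1
    refine ih dk _ ?_ ?_
    · exact (List.pairwise_cons.mp hpw).2
    · intro y hy
      have hy' := hinv y (List.mem_cons_of_mem _ hy)
      have hky : k < y := hklt y hy
      -- split the head off the filtered count
      have hsplit : ((k :: t).filter (fun d => dr.contains d)).countP (fun d => decide (d < y))
          = (if dr.contains k then 1 else 0) + (t.filter (fun d => dr.contains d)).countP (fun d => decide (d < y)) := by
        rw [List.filter_cons]
        split
        · rw [List.countP_cons]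
          simp [hky]
          omega
        · simp
      rw [hsplit] at hy'
      push_cast at hy' ⊢
      split at hy' <;> simp_all <;> try omega

-- strictly increasing keys after sorting the (distinct) dict keys
theorem pvSortedKeys_lt (keys : List Int) (hnd : keys.Nodup) :
    (PySem.List.sorted keys (fun x => x)).Pairwise (· < ·) := by
  have hle : (PySem.List.sorted keys (fun x => x)).Pairwise (· ≤ ·) := by
    have := PySem.List.sorted_pairwise keys (fun x => x)
    simpa using this
  have hnd' : (PySem.List.sorted keys (fun x => x)).Nodup :=
    (PySem.List.sorted_perm keys (fun x => x) false).nodup_iff.mpr hnd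
  have := List.Pairwise.and hle hnd'
  exact this.imp (fun h => lt_of_le_of_ne h.1 h.2)

-- ===== VERDICT (by name: the statement is the Claim_ definition above) =====
theorem build_row_mapping_after_deletion_spec : Claim_equal_build_row_mapping_after_deletion := by
  intro original_map deleted_rows _
  unfold Spec_build_row_mapping_after_deletion
  unfold build_row_mapping_after_deletion build_row_mapping_after_deletion_alt
  simp only []
  set keys := (PySem.Dict.ofList original_map).keys with hkeys
  have hndk : keys.Nodup := PySem.Dict.nodup_keys_ofList original_map
  set ks := PySem.List.sorted keys (fun x => x) with hks
  have hlt : ks.Pairwise (· < ·) := pvSortedKeys_lt keys hndk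
  have hnd : ks.Nodup := hlt.nodup
  -- B's sorted deleted index is the filter of the sorted keys
  have hdk : PySem.List.sorted (keys.filter (fun k => deleted_rows.contains k)) (fun x => x)
      = ks.filter (fun k => deleted_rows.contains k) := by
    apply PySem.List.sorted_eq_of_perm_of_pairwise_lt
    · exact (PySem.List.sorted_perm keys (fun x => x) false).filter _
    · exact hlt.filter _
  set dk := ks.filter (fun k => deleted_rows.contains k) with hdkdef
  -- bisect = count of smaller elements on the sorted index
  have hdkle : dk.Pairwise (· ≤ ·) := (hlt.filter _).imp le_of_lt
  have hbis : ∀ x : Int, pvBisectLoop dk x 0 dk.length = dk.countP (fun d => decide (d < x)) := by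
    intro x
    exact pvBisectLoop_eq_countP dk x hdkle 0 dk.length (Nat.zero_le _) (le_refl _)
      (fun j hj hlt0 => absurd hlt0 (Nat.not_lt_zero j))
      (fun j hj hge => absurd hj (by omega))
  -- A's loop appends its entries in order
  rw [pvFoldA_items deleted_rows ks PySem.Dict.empty 0 hnd (fun k _ => PySem.Dict.contains_empty k)]
  -- B's comprehension over distinct keys appends its entries in order
  have hmapkeys : (ks.map (fun k =>
      (k, if deleted_rows.contains k then (none : Option Int)
          else some (k - (pvBisectLoop dk k 0 dk.length : Int))))).map Prod.fst = ks := by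
    simp [Function.comp_def]
  rw [hdk]
  have hB : (PySem.Dict.ofList (ks.map (fun k =>
      (k, if deleted_rows.contains k then (none : Option Int)
          else some (k - (pvBisectLoop dk k 0 dk.length : Int)))))).items
      = ks.map (fun k =>
        (k, if deleted_rows.contains k then (none : Option Int)
            else some (k - (pvBisectLoop dk k 0 dk.length : Int)))) := by
    have := PySem.Dict.items_foldl_insert_fresh
      (ks.map (fun k =>
        (k, if deleted_rows.contains k then (none : Option Int)
            else some (k - (pvBisectLoop dk k 0 dk.length : Int)))))
      Prod.fst Prod.snd PySem.Dict.empty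
      (fun a _ => PySem.Dict.contains_empty a.1)
      (by rw [hmapkeys]; exact hnd)
    simpa [PySem.Dict.ofList, PySem.Dict.update] using this
  rw [hB]
  -- finally: running offset = count of smaller deleted keys
  rw [pvEntries_eq_map deleted_rows ks dk 0 hlt (by intro k _; simp [hdkdef])]
  have hempty : (PySem.Dict.empty : PySem.Dict Int (Option Int)).items = [] := rfl
  rw [hempty, List.nil_append]
  apply List.map_congr_left
  intro k hk
  simp [hbis k]
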